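-- pv_equiv track=rewrite | github.com/thisguyisbarry/Uni-Programming | Year 2/Python/Lab Exam 1/Labcorrections1.py | make_new_row
-- ===== SOURCE A (Python) =====
-- def make_new_row(old_row):
--     """Requires:
--            -- list old_row that begins and ends with a 1 and has zero or more
--               integers in between (has to have at least [1,1])
--            Returns:
--            -- list beginning and ending with a 1 and each interior (non 1)
--               integer is the sum of the corresponding old_row elements
--               For example if old_row = [1,4,6,4,1], then new_row = [1,5,10,10,5,1],
--               i.e. 5=1+4, 10=4+6, 10=6+4, 5=4+1 """
--
--     if old_row == []:
--         return[1]
--     if old_row == [1]: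
--         return[1,1]
--
--     new_row = [1]
--     for i in range(len(old_row)-1):
--         new_row.append(old_row[i] + old_row[i+1])
--     else:
--         new_row.append(1)
--     return new_row
-- ===== SOURCE B (Python) =====
-- def make_new_row(old_row):
--     if old_row == []:
--         return [1]
--     return [1] + _pairs(old_row) + [1]
--
--
-- def _pairs(row):
--     """Divide and conquer: the adjacent-pair sums of a row are the sums of its
--     left half, the sum across the split boundary, and the sums of its right half."""
--     n = len(row)
--     if n <= 1:
--         return []
--     m = n // 2
--     return _pairs(row[:m]) + [row[m - 1] + row[m]] + _pairs(row[m:])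
-- ===== Notes on version B (the rewrite author's own statement) =====
-- stated objective: alternative
-- what changed: B replaces A's linear index loop with mutation and its singleton-row special case by divide and conquer: the adjacent-pair sums are computed recursively as the sums of the left half, the boundary sum, and the sums of the right half, concatenated between literal endpoint ones.
import Mathlib
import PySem

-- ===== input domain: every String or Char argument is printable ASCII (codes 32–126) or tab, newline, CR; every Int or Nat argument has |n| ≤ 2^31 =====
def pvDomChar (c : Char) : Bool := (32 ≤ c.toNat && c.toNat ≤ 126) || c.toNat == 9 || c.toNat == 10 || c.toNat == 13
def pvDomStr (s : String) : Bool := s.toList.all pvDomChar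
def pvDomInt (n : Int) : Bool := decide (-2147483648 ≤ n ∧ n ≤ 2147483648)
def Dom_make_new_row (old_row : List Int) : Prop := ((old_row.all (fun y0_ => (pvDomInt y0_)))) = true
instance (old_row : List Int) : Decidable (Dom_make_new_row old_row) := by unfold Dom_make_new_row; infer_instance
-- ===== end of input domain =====

-- B replaces A's linear index loop and singleton-row special case by a divide-and-conquer recursion on halves (alternative decomposition; same result).

-- ===== PORT A =====
def make_new_row (old_row : List Int) : List Int :=
  if old_row = [] then [1]
  else if old_row = [1] then [1, 1]
  else
    let new_row : List Int := [1]
    let new_row :=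
      (PySem.List.pyRange 0 ((old_row.length : Int) - 1) 1).foldl
        (fun acc i =>
          acc ++ [PySem.List.pyGetD old_row i 0 + PySem.List.pyGetD old_row (i + 1) 0])
        new_row
    new_row ++ [1]

-- ===== PORT B =====
-- _pairs: the slices row[:m] / row[m:] (0 ≤ m ≤ len) are exactly take/drop, and the
-- indices m-1, m are nonnegative and in range, so getD is exact Python indexing here.
def pairs (xs : List Int) : List Int :=
  if xs.length ≤ 1 then []
  else
    let m := xs.length / 2
    pairs (xs.take m) ++ [xs.getD (m - 1) 0 + xs.getD m 0] ++ pairs (xs.drop m)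
termination_by xs.length
decreasing_by
  · simp only [List.length_take]; omega
  · simp only [List.length_drop]; omega

def make_new_row_alt (old_row : List Int) : List Int :=
  if old_row = [] then [1]
  else [1] ++ pairs old_row ++ [1]

-- ===== PRECONDITION & SPEC =====
def Spec_make_new_row (old_row : List Int) (out : List Int) : Prop := out = make_new_row_alt old_row
instance (old_row : List Int) (out : List Int) : Decidable (Spec_make_new_row old_row out) := by unfold Spec_make_new_row; infer_instance

-- ===== CLAIM (what is proved, stated in full; the proofs are below) =====
def Claim_equal_make_new_row : Prop := ∀ (old_row : List Int), Dom_make_new_row old_row → Spec_make_new_row old_row (make_new_row old_row)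

-- ===== LEMMAS AND PROOFS =====

-- Adjacent-pair sums split at any boundary written as a ++ [x] ++ y :: b.
theorem zipWith_adj_append (a b : List Int) (x y : Int) :
    List.zipWith (· + ·) ((a ++ [x]) ++ (y :: b)) ((a ++ [x]) ++ (y :: b)).tail
      = List.zipWith (· + ·) (a ++ [x]) (a ++ [x]).tail
        ++ (x + y) :: List.zipWith (· + ·) (y :: b) b := by
  induction a with
  | nil => simp
  | cons z a' ih =>
    cases a' with
    | nil => simp
    | cons w t =>
      simp only [List.cons_append, List.zipWith_cons_cons, List.tail_cons] at *
      simpa using ih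

-- pairs computes the adjacent-pair sums (zipWith of the list with its tail).
theorem pairs_eq (xs : List Int) : pairs xs = List.zipWith (· + ·) xs xs.tail := by
  fun_induction pairs xs with
  | case1 xs h =>
    match xs, h with
    | [], _ => simp
    | [x], _ => simp
  | case2 xs h m ih1 ih2 =>
    have hlen : 2 ≤ xs.length := by omega
    have hm1 : 1 ≤ m := by simp only [m]; omega
    have hmlt : m < xs.length := by simp only [m]; omega
    have hx : m - 1 < xs.length := by omega
    have htake : xs.take m = xs.take (m - 1) ++ [xs[m - 1]] := by
      conv_lhs => rw [show m = (m - 1) + 1 by omega]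
      rw [List.take_add_one]
      simp [List.getElem?_eq_getElem hx]
    have hdrop : xs.drop m = xs[m] :: xs.drop (m + 1) := List.drop_eq_getElem_cons hmlt
    have hsplit : xs = (xs.take (m - 1) ++ [xs[m - 1]]) ++ (xs[m] :: xs.drop (m + 1)) := by
      rw [← htake, ← hdrop, List.take_append_drop]
    rw [ih1, ih2, htake, hdrop]
    rw [List.getD_eq_getElem xs 0 hx, List.getD_eq_getElem xs 0 hmlt]
    conv_rhs => rw [hsplit]
    rw [zipWith_adj_append]
    simp

-- Adjacent-pair sums read off by index equal the zipWith of the list with its tail.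
theorem range_map_adj_eq_zipWith (xs : List Int) :
    (List.range (xs.length - 1)).map (fun k => xs.getD k 0 + xs.getD (k + 1) 0)
      = List.zipWith (· + ·) xs xs.tail := by
  apply List.ext_getElem
  · simp [List.length_zipWith, List.length_tail]
  · intro k h1 h2
    simp only [List.length_map, List.length_range] at h1
    simp only [List.getElem_map, List.getElem_range, List.getElem_zipWith]
    rw [List.getD_eq_getElem xs 0 (by omega), List.getD_eq_getElem xs 0 (by omega),
        List.getElem_tail]

-- ===== VERDICT =====
theorem make_new_row_spec : Claim_equal_make_new_row := by
  intro old_row _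
  unfold Spec_make_new_row make_new_row make_new_row_alt
  by_cases hnil : old_row = []
  · simp [hnil]
  · by_cases hone : old_row = [1]
    · simp [hone, pairs]
    · simp only [hnil, hone, if_false]
      rw [PySem.List.foldl_append_singleton_eq_map]
      have hlen : (old_row.length : Int) - 1 = ((old_row.length - 1 : Nat) : Int) := by
        cases old_row with
        | nil => exact absurd rfl hnil
        | cons x l => simp
      rw [hlen, PySem.List.pyRange_zero_nat, List.map_map]
      have : ∀ k : Nat,
          PySem.List.pyGetD old_row (k : Int) 0 + PySem.List.pyGetD old_row ((k : Int) + 1) 0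
            = old_row.getD k 0 + old_row.getD (k + 1) 0 := by
        intro k
        rw [show ((k : Int) + 1) = ((k + 1 : Nat) : Int) by push_cast; ring]
        rw [PySem.List.pyGetD_natCast, PySem.List.pyGetD_natCast]
      simp only [Function.comp_def, this]
      rw [range_map_adj_eq_zipWith, pairs_eq]
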